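-- pv_equiv track=rewrite | github.com/rushikesh5045/BTP | work/annotations.py | annotate_with_bio
-- ===== SOURCE A (Python) =====
-- def annotate_with_bio(conversation, glaucoma_keywords):
--     annotations = []
--     words = conversation.split()
--     for word in words:
--         if word.lower() in glaucoma_keywords:
--             annotations.append("B-Glaucoma")
--         elif annotations and annotations[-1] == "B-Glaucoma":
--             annotations.append("I-Glaucoma")
--         else:
--             annotations.append("O")
--     return annotations
-- ===== SOURCE B (Python) =====
-- def annotate_with_bio(conversation, glaucoma_keywords):
--     words = conversation.split()
--     tags = ["O"] * len(words)
--     for i, word in enumerate(words):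
--         if word.lower() in glaucoma_keywords:
--             if i + 1 < len(tags):
--                 tags[i + 1] = "I-Glaucoma"
--             tags[i] = "B-Glaucoma"
--     return tags
-- ===== Notes on version B (the rewrite author's own statement) =====
-- stated objective: alternative
-- what changed: B replaces A's append-and-read-back scan (which inspects the last emitted tag) by a stamping algorithm: it allocates an all-'O' tag array and, for each keyword occurrence, overwrites position i with 'B-Glaucoma' and position i+1 with 'I-Glaucoma' (a later keyword's 'B' overwrites the stamped 'I'), so non-keyword words are never branched on.
import Mathlib
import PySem

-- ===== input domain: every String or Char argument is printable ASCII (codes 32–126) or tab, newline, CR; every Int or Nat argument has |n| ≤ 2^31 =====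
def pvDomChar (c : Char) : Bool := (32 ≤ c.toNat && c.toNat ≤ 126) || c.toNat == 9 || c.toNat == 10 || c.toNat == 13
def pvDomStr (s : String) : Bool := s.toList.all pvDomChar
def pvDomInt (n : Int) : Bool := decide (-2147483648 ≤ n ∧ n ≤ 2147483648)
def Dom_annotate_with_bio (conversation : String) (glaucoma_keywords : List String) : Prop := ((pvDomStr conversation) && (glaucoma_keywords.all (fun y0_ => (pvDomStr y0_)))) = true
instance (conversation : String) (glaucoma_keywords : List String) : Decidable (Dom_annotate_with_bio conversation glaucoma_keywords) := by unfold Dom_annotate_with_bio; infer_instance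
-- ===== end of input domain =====

-- B stamps an all-"O" tag array: each keyword occurrence overwrites position i with "B-Glaucoma"
-- and position i+1 with "I-Glaucoma" (later "B" stamps overwrite), instead of A's append scan
-- that reads back the last emitted tag.

-- ===== PORT A =====
def annotate_with_bio (conversation : String) (glaucoma_keywords : List String) : List String :=
  let words := PySem.Str.split₀ conversation
  words.foldl (fun annotations word =>
    if glaucoma_keywords.contains (PySem.Str.lower word) then
      annotations ++ ["B-Glaucoma"]
    else if annotations ≠ [] ∧ PySem.List.pyGet? annotations (-1) = some "B-Glaucoma" then
      annotations ++ ["I-Glaucoma"]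
    else
      annotations ++ ["O"]) []

-- ===== PORT B =====
-- the loop body of Source B (one enumerated word, stamping into tags)
def pvStampB (glaucoma_keywords : List String) (tags : List String) (iw : Int × String) : List String :=
  if glaucoma_keywords.contains (PySem.Str.lower iw.2) then
    let tags := if iw.1 + 1 < (tags.length : Int) then PySem.List.pySetD tags (iw.1 + 1) "I-Glaucoma" else tags
    PySem.List.pySetD tags iw.1 "B-Glaucoma"
  else tags

def annotate_with_bio_alt (conversation : String) (glaucoma_keywords : List String) : List String :=
  let words := PySem.Str.split₀ conversation
  let tags := PySem.List.pyRepeat ["O"] (words.length : Int)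
  (PySem.List.enumerate words).foldl (pvStampB glaucoma_keywords) tags

-- ===== PRECONDITION & SPEC =====
def Spec_annotate_with_bio (conversation : String) (glaucoma_keywords : List String) (out : List String) : Prop := out = annotate_with_bio_alt conversation glaucoma_keywords
instance (conversation : String) (glaucoma_keywords : List String) (out : List String) : Decidable (Spec_annotate_with_bio conversation glaucoma_keywords out) := by unfold Spec_annotate_with_bio; infer_instance

-- ===== CLAIM (what is proved, stated in full; the proofs are below) =====
def Claim_equal_annotate_with_bio : Prop := ∀ (conversation : String) (glaucoma_keywords : List String), Dom_annotate_with_bio conversation glaucoma_keywords → Spec_annotate_with_bio conversation glaucoma_keywords (annotate_with_bio conversation glaucoma_keywords)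

-- ===== LEMMAS AND PROOFS =====

-- Reference tagger over the words, threading "previous word was a keyword".
def pvGoB (kw : List String) (prev : Bool) : List String → List String
  | [] => []
  | w :: ws =>
    let b := kw.contains (PySem.Str.lower w)
    (if b then "B-Glaucoma" else if prev then "I-Glaucoma" else "O") :: pvGoB kw b ws

-- A's fold equals the reference tagger, for any accumulator.
lemma foldA_eq (kw : List String) (ws : List String) :
    ∀ (acc : List String),
      ws.foldl (fun annotations word =>
        if kw.contains (PySem.Str.lower word) then
          annotations ++ ["B-Glaucoma"]
        else if annotations ≠ [] ∧ PySem.List.pyGet? annotations (-1) = some "B-Glaucoma" then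
          annotations ++ ["I-Glaucoma"]
        else
          annotations ++ ["O"]) acc
      = acc ++ pvGoB kw (acc.getLast? == some "B-Glaucoma") ws := by
  induction ws with
  | nil => intro acc; simp [pvGoB]
  | cons w ws ih =>
    intro acc
    simp only [List.foldl_cons]
    by_cases hb : kw.contains (PySem.Str.lower w) = true
    · have hm : PySem.Str.lower w ∈ kw := by simpa using hb
      rw [if_pos hb, ih,
        show pvGoB kw (acc.getLast? == some "B-Glaucoma") (w :: ws)
            = "B-Glaucoma" :: pvGoB kw true ws by simp [pvGoB, hm]]
      simp
    · have hb' : kw.contains (PySem.Str.lower w) = false := by simpa using hb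
      have hm : PySem.Str.lower w ∉ kw := by simpa using hb'
      rw [if_neg hb]
      have hcond : (acc ≠ [] ∧ PySem.List.pyGet? acc (-1) = some "B-Glaucoma")
          ↔ acc.getLast? = some "B-Glaucoma" := by
        rw [PySem.List.pyGet?_neg_one]
        constructor
        · rintro ⟨-, h⟩; exact h
        · intro h; exact ⟨by rintro rfl; simp at h, h⟩
      by_cases hp : acc.getLast? = some "B-Glaucoma"
      · rw [if_pos (hcond.mpr hp), ih,
          show pvGoB kw (acc.getLast? == some "B-Glaucoma") (w :: ws)
              = "I-Glaucoma" :: pvGoB kw false ws by simp [pvGoB, hm, hp]]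
        simp
      · rw [if_neg (fun h => hp (hcond.mp h)), ih,
          show pvGoB kw (acc.getLast? == some "B-Glaucoma") (w :: ws)
              = "O" :: pvGoB kw false ws by simp [pvGoB, hm, hp]]
        simp

-- the pending tail of the tag array: position j is "I-Glaucoma" iff the previous word was a
-- keyword, everything beyond is still the initial "O".
def pvTail (carry : Bool) : (n : ℕ) → List String
  | 0 => []
  | Nat.succ m => (if carry then "I-Glaucoma" else "O") :: List.replicate m "O"

-- B's stamping fold, started at index j on pre ++ pvTail, equals pre ++ the reference tagger.
lemma stampB_eq (kw : List String) (ws : List String) :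
    ∀ (pre : List String) (carry : Bool),
      (PySem.List.enumerate ws (pre.length : Int)).foldl (pvStampB kw)
          (pre ++ pvTail carry ws.length)
        = pre ++ pvGoB kw carry ws := by
  induction ws with
  | nil => intro pre carry; simp [pvGoB, pvTail, PySem.List.enumerate_nil]
  | cons w ws ih =>
    intro pre carry
    rw [PySem.List.enumerate_cons]
    simp only [List.foldl_cons]
    by_cases hb : kw.contains (PySem.Str.lower w) = true
    · -- keyword: stamp "I-Glaucoma" at position j+1 (if any), then "B-Glaucoma" at j
      have hm : PySem.Str.lower w ∈ kw := by simpa using hb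
      have hstep : pvStampB kw (pre ++ pvTail carry (w :: ws).length) ((pre.length : Int), w)
          = (pre ++ ["B-Glaucoma"]) ++ pvTail true ws.length := by
        unfold pvStampB
        rw [if_pos hb]
        cases ws with
        | nil =>
          simp only [pvTail, List.length_cons, List.length_nil, List.replicate]
          have hlen : ¬ ((pre.length : Int) + 1 < ((pre ++ [if carry then "I-Glaucoma" else "O"]).length : Int)) := by
            simp
          rw [if_neg hlen]
          simp [PySem.List.pySetD_natCast]
        | cons v vs =>
          have h1 : ((pre ++ pvTail carry (w :: v :: vs).length).length : Int)
              = (pre.length : Int) + (2 + vs.length) := by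
            simp [pvTail]; ring
          have hlt : (pre.length : Int) + 1 < ((pre ++ pvTail carry (w :: v :: vs).length).length : Int) := by
            rw [h1]; omega
          rw [if_pos hlt]
          have e1 : PySem.List.pySetD (pre ++ pvTail carry (w :: v :: vs).length)
                ((pre.length : Int) + 1) "I-Glaucoma"
              = pre ++ (if carry then "I-Glaucoma" else "O") :: "I-Glaucoma" :: List.replicate vs.length "O" := by
            rw [show ((pre.length : Int) + 1) = ((pre.length + 1 : ℕ) : Int) by push_cast; ring,
              PySem.List.pySetD_natCast]
            simp [pvTail, List.replicate_succ]
          rw [e1, PySem.List.pySetD_natCast]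
          simp [pvTail]
      rw [hstep,
        show (pre.length : Int) + 1 = (((pre ++ ["B-Glaucoma"]).length : ℕ) : Int) by simp,
        ih,
        show pvGoB kw carry (w :: ws) = "B-Glaucoma" :: pvGoB kw true ws by simp [pvGoB, hm]]
      simp
    · -- not a keyword: tags untouched, position j keeps its pending value
      have hb' : kw.contains (PySem.Str.lower w) = false := by simpa using hb
      have hm : PySem.Str.lower w ∉ kw := by simpa using hb'
      have hstep : pvStampB kw (pre ++ pvTail carry (w :: ws).length) ((pre.length : Int), w)
          = (pre ++ [if carry then "I-Glaucoma" else "O"]) ++ pvTail false ws.length := by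
        unfold pvStampB
        rw [if_neg hb]
        cases ws with
        | nil => simp [pvTail]
        | cons v vs => simp [pvTail, List.replicate_succ]
      rw [hstep,
        show (pre.length : Int) + 1 = (((pre ++ [if carry then "I-Glaucoma" else "O"]).length : ℕ) : Int) by simp,
        ih,
        show pvGoB kw carry (w :: ws)
            = (if carry then "I-Glaucoma" else "O") :: pvGoB kw false ws by
          by_cases hcv : carry <;> simp [pvGoB, hm, hcv]]
      simp

lemma pvTail_false (n : ℕ) : pvTail false n = List.replicate n "O" := by
  cases n <;> simp [pvTail, List.replicate_succ]

-- ===== VERDICT (by name: the statement is the Claim_ definition above) =====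
theorem annotate_with_bio_spec : Claim_equal_annotate_with_bio := by
  intro conv kw _
  unfold Spec_annotate_with_bio annotate_with_bio annotate_with_bio_alt
  rw [foldA_eq]
  simp only [List.nil_append, List.getLast?_nil]
  rw [show ((none : Option String) == some "B-Glaucoma") = false from rfl]
  have := stampB_eq kw (PySem.Str.split₀ conv) [] false
  simp only [List.length_nil, Nat.cast_zero, List.nil_append, pvTail_false] at this
  rw [PySem.List.pyRepeat_singleton]
  simpa using this.symm
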